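-- pv_equiv track=rewrite | github.com/HeathenToaster/code | VIGOR_utils.py | recut
-- ===== SOURCE A (Python) =====
-- def recut(data_to_cut, data_template):
--     output = []
--     start_of_bin = 0
--     for i, _ in enumerate(data_template):
--         end_of_bin = start_of_bin + len(data_template[i])
--         output.append(data_to_cut[start_of_bin: end_of_bin])
--         start_of_bin = end_of_bin
--     return output
-- ===== SOURCE B (Python) =====
-- def _bounds(segments, start):
--     if not segments:
--         return [start]
--     return [start] + _bounds(segments[1:], start + len(segments[0]))
--
--
-- def recut(data_to_cut, data_template):
--     bounds = _bounds(data_template, 0)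
--     return [data_to_cut[a:b] for a, b in zip(bounds, bounds[1:])]
-- ===== Notes on version B (the rewrite author's own statement) =====
-- stated objective: alternative
-- what changed: B first builds the full table of slice boundaries (prefix sums of segment lengths, via a recursive helper) and then slices once per consecutive boundary pair, instead of A's single loop over enumerate(data_template) carrying one running start index.
import Mathlib
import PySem

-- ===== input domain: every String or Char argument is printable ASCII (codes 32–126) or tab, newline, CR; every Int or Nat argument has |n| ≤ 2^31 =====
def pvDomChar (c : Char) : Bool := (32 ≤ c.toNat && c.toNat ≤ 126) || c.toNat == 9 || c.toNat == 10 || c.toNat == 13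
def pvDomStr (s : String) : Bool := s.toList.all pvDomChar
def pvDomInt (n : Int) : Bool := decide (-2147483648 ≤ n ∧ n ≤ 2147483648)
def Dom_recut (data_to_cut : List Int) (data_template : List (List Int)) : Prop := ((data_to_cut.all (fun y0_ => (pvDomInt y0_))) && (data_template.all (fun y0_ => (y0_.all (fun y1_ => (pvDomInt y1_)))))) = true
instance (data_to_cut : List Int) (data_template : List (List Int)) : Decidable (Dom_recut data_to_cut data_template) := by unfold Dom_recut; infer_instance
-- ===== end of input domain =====

-- B builds an explicit table of slice boundaries (prefix sums of segment lengths) and slices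
-- per consecutive boundary pair, instead of A's single loop with a running start index.


-- ===== PORT A =====
-- loop over data_template carrying (output, start_of_bin)
def recut (data_to_cut : List Int) (data_template : List (List Int)) : List (List Int) :=
  (data_template.foldl
    (fun (st : List (List Int) × Int) seg =>
      let end_of_bin := st.2 + (seg.length : Int)
      (st.1 ++ [PySem.List.slice data_to_cut (some st.2) (some end_of_bin)], end_of_bin))
    ([], 0)).1

-- ===== PORT B =====
-- _bounds(segments, start): recursive prefix-sum boundary table
def recutBounds (segments : List (List Int)) (start : Int) : List Int :=
  match segments with
  | [] => [start]
  | seg :: rest => start :: recutBounds rest (start + (seg.length : Int))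

def recut_alt (data_to_cut : List Int) (data_template : List (List Int)) : List (List Int) :=
  let bounds := recutBounds data_template 0
  (bounds.zip bounds.tail).map (fun p => PySem.List.slice data_to_cut (some p.1) (some p.2))

-- ===== PRECONDITION & SPEC =====
def Spec_recut (data_to_cut : List Int) (data_template : List (List Int)) (out : List (List Int)) : Prop := out = recut_alt data_to_cut data_template
instance (data_to_cut : List Int) (data_template : List (List Int)) (out : List (List Int)) : Decidable (Spec_recut data_to_cut data_template out) := by unfold Spec_recut; infer_instance

-- ===== CLAIM (what is proved, stated in full; the proofs are below) =====
def Claim_equal_recut : Prop := ∀ (data_to_cut : List Int) (data_template : List (List Int)), Dom_recut data_to_cut data_template → Spec_recut data_to_cut data_template (recut data_to_cut data_template)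

-- ===== LEMMAS AND PROOFS =====
theorem recutBounds_head_tail (segments : List (List Int)) (start : Int) :
    recutBounds segments start = start :: (recutBounds segments start).tail := by
  cases segments <;> simp [recutBounds]

theorem recut_loop (data_to_cut : List Int) (t : List (List Int)) (acc : List (List Int)) (s : Int) :
    (t.foldl
      (fun (st : List (List Int) × Int) seg =>
        let end_of_bin := st.2 + (seg.length : Int)
        (st.1 ++ [PySem.List.slice data_to_cut (some st.2) (some end_of_bin)], end_of_bin))
      (acc, s)).1
    = acc ++ ((recutBounds t s).zip (recutBounds t s).tail).map
        (fun p => PySem.List.slice data_to_cut (some p.1) (some p.2)) := by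
  induction t generalizing acc s with
  | nil => simp [recutBounds]
  | cons seg rest ih =>
      simp only [List.foldl_cons]
      rw [ih]
      conv_rhs => rw [recutBounds, recutBounds_head_tail rest (s + (seg.length : Int))]
      conv_lhs => rw [recutBounds_head_tail rest (s + (seg.length : Int))]
      simp

-- ===== VERDICT (by name: the statement is the Claim_ definition above) =====
theorem recut_spec : Claim_equal_recut := by
  intro d t _
  show recut d t = recut_alt d t
  simpa [recut, recut_alt] using recut_loop d t [] 0
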